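-- pv_equiv track=rewrite | github.com/knstntn1/snap-cuber | azure_function/function_app.py | _plan_to_bring_face_to_D
-- ===== SOURCE A (Python) =====
-- from typing import Dict, List, Tuple, Optional
--
-- def _plan_to_bring_face_to_D(pos: Dict[str, str], target_face: str) -> Optional[List[str]]:
--     from collections import deque
--     def apply(op: str, p: Dict[str,str]) -> Dict[str,str]:
--         m=dict(p)
--         if op=="ROTATE_CCW": cyc={'F':'R','R':'B','B':'L','L':'F'}
--         elif op=="ROTATE_CW": cyc={'F':'L','L':'B','B':'R','R':'F'}
--         elif op=="TILT":      cyc={'U':'L','L':'D','D':'R','R':'U'}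
--         q={}
--         for k in m: q[k]=cyc.get(m[k], m[k])
--         return q
--     q=deque([(pos.copy(), [])]); seen={tuple(sorted(pos.items()))}
--     for _ in range(24):
--         for _ in range(len(q)):
--             cur,ops=q.popleft()
--             if cur[target_face]=='D': return ops
--             for op in ("ROTATE_CCW","ROTATE_CW","TILT"):
--                 nxt=apply(op,cur)
--                 key=tuple(sorted(nxt.items()))
--                 if key in seen: continue
--                 seen.add(key); q.append((nxt, ops+[op]))
--     return None
-- ===== SOURCE B (Python) =====
-- # Closed form: the reachable orbit of a single face symbol under the three ops is tiny and
-- # fixed, so the lex-smallest shortest op sequence bringing each symbol to 'D' is precomputed.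
-- _OPS_TO_D = {
--     'D': [],
--     'L': ["TILT"],
--     'U': ["TILT", "TILT"],
--     'F': ["ROTATE_CW", "TILT"],
--     'B': ["ROTATE_CCW", "TILT"],
--     'R': ["ROTATE_CCW", "ROTATE_CCW", "TILT"],
-- }
--
-- def _plan_to_bring_face_to_D(pos, target_face):
--     ops = _OPS_TO_D.get(pos[target_face])
--     return None if ops is None else list(ops)
-- ===== Notes on version B (the rewrite author's own statement) =====
-- stated objective: faster
-- what changed: Replaces the BFS over whole orientation dictionaries (copying and sorting the full dict at every node) by a precomputed lookup table: the answer depends only on pos[target_face], whose orbit under the three ops is a fixed 6-element set, so the lex-smallest shortest op sequence per symbol is read off a constant table.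
import Mathlib
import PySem

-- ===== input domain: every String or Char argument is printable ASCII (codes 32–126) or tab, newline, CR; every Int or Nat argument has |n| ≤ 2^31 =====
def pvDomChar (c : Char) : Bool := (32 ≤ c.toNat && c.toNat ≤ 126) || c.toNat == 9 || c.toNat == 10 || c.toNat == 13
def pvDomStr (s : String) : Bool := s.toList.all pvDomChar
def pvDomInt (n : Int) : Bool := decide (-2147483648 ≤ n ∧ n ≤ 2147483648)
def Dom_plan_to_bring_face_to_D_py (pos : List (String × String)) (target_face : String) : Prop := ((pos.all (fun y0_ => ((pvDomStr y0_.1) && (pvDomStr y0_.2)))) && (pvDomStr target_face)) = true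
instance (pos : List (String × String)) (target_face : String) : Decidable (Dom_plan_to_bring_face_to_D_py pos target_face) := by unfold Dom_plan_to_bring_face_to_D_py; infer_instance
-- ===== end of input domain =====

-- B replaces A's breadth-first search over whole orientation dictionaries by a constant
-- lookup table (the tracked symbol's orbit is a fixed 6-element set); return value only,
-- neither program mutates `pos`.

-- ===== PORT A =====
def pvCyc (op : String) : PySem.Dict String String :=
  if op = "ROTATE_CCW" then PySem.Dict.ofList [("F","R"),("R","B"),("B","L"),("L","F")]
  else if op = "ROTATE_CW" then PySem.Dict.ofList [("F","L"),("L","B"),("B","R"),("R","F")]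
  else PySem.Dict.ofList [("U","L"),("L","D"),("D","R"),("R","U")]

-- for k in m: q[k] = cyc.get(m[k], m[k])
def pvApply (op : String) (p : PySem.Dict String String) : PySem.Dict String String :=
  p.keys.foldl (fun q k => q.insert k ((pvCyc op).getD (p.getD k "") (p.getD k ""))) PySem.Dict.empty

-- tuple(sorted(d.items()))
def pvSortedItems (d : PySem.Dict String String) : List (String × String) :=
  PySem.List.sorted2 d.items (·.1) (·.2)

-- the inner 'for _ in range(len(q))' loop; Sum.inl = early 'return ops'
def pvInner (target : String) :
    Nat → List (PySem.Dict String String × List String) → PySem.Set (List (String × String)) →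
    Sum (List String) (List (PySem.Dict String String × List String) × PySem.Set (List (String × String)))
  | 0, q, seen => .inr (q, seen)
  | _ + 1, [], seen => .inr ([], seen)
  | n + 1, (cur, ops) :: rest, seen =>
      if cur.get? target = some "D" then .inl ops
      else
        let st := ["ROTATE_CCW", "ROTATE_CW", "TILT"].foldl (fun st op =>
          let nxt := pvApply op cur
          let key := pvSortedItems nxt
          if PySem.Set.contains st.2 key then st
          else (st.1 ++ [(nxt, ops ++ [op])], PySem.Set.add st.2 key)) (rest, seen)
        pvInner target n st.1 st.2

-- the outer 'for _ in range(24)' loop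
def pvOuter (target : String) :
    Nat → List (PySem.Dict String String × List String) → PySem.Set (List (String × String)) →
    Option (List String)
  | 0, _, _ => none
  | n + 1, q, seen =>
      match pvInner target q.length q seen with
      | .inl ops => some ops
      | .inr (q', seen') => pvOuter target n q' seen'

def plan_to_bring_face_to_D_py (pos : List (String × String)) (target_face : String) : Option (List String) :=
  let d := PySem.Dict.ofList pos
  pvOuter target_face 24 [(d, [])] (PySem.Set.add PySem.Set.empty (pvSortedItems d))

-- ===== PORT B =====
def pvOpsToD : PySem.Dict String (List String) :=
  PySem.Dict.ofList [("D", []), ("L", ["TILT"]), ("U", ["TILT", "TILT"]),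
    ("F", ["ROTATE_CW", "TILT"]), ("B", ["ROTATE_CCW", "TILT"]),
    ("R", ["ROTATE_CCW", "ROTATE_CCW", "TILT"])]

def plan_to_bring_face_to_D_py_alt (pos : List (String × String)) (target_face : String) : Option (List String) :=
  match (PySem.Dict.ofList pos).get? target_face with
  | none => none          -- pos[target_face] raises KeyError in Python; excluded by Pre_
  | some face => pvOpsToD.get? face

-- ===== PRECONDITION & SPEC =====
-- Pre_ excludes exactly the inputs where a missing target_face key makes both programs raise KeyError.
def Pre_plan_to_bring_face_to_D_py (pos : List (String × String)) (target_face : String) : Prop :=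
  (PySem.Dict.ofList pos).contains target_face = true
instance (pos : List (String × String)) (target_face : String) : Decidable (Pre_plan_to_bring_face_to_D_py pos target_face) := by unfold Pre_plan_to_bring_face_to_D_py; infer_instance

def pvWitness_plan_to_bring_face_to_D_py : (List (String × String)) × String := ([("F", "R"), ("U", "D")], "F")

def Spec_plan_to_bring_face_to_D_py (pos : List (String × String)) (target_face : String) (out : Option (List String)) : Prop := out = plan_to_bring_face_to_D_py_alt pos target_face
instance (pos : List (String × String)) (target_face : String) (out : Option (List String)) : Decidable (Spec_plan_to_bring_face_to_D_py pos target_face out) := by unfold Spec_plan_to_bring_face_to_D_py; infer_instance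

-- ===== CLAIM (what is proved, stated in full; the proofs are below) =====
def Claim_equal_plan_to_bring_face_to_D_py : Prop := ∀ (pos : List (String × String)) (target_face : String), Dom_plan_to_bring_face_to_D_py pos target_face → Pre_plan_to_bring_face_to_D_py pos target_face → Spec_plan_to_bring_face_to_D_py pos target_face (plan_to_bring_face_to_D_py pos target_face)

-- ===== LEMMAS AND PROOFS =====

-- abbreviations for A's value transformation
def pvSig (op v : String) : String := (pvCyc op).getD v v
def pvValApp (ops : List String) (v : String) : String := ops.foldl (fun v op => pvSig op v) v
def pvDictApp (ops : List String) (d : PySem.Dict String String) : PySem.Dict String String :=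
  ops.foldl (fun d op => pvApply op d) d
def pvLetters : List String := ["F", "R", "B", "L", "U", "D"]
-- the quotient state: images of the six letters, "-" marking letters absent from d.values
def pvRep (vals : List String) (ops : List String) : List String :=
  pvLetters.map (fun c => if c ∈ vals then pvValApp ops c else "-")

-- the quotient BFS (same shape as pvInner/pvOuter, states are pvRep vectors)
def qInner (gi : Nat) : Nat → List (List String × List String) → List (List String) →
    Sum (List String) (List (List String × List String) × List (List String))
  | 0, q, seen => .inr (q, seen)
  | _ + 1, [], seen => .inr ([], seen)
  | n + 1, (rep, ops) :: rest, seen =>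
      if rep.getD gi "-" = "D" then .inl ops
      else
        let st := ["ROTATE_CCW", "ROTATE_CW", "TILT"].foldl (fun st op =>
          let nr := rep.map (pvSig op)
          if nr ∈ st.2 then st else (st.1 ++ [(nr, ops ++ [op])], st.2 ++ [nr])) (rest, seen)
        qInner gi n st.1 st.2

def qOuter (gi : Nat) : Nat → List (List String × List String) → List (List String) → Option (List String)
  | 0, _, _ => none
  | n + 1, q, seen =>
      match qInner gi q.length q seen with
      | .inl ops => some ops
      | .inr (q', seen') => qOuter gi n q' seen'

def qRep0 (mask : List Bool) : List String :=
  (pvLetters.zip mask).map (fun cb => if cb.2 then cb.1 else "-")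
def quotRun (mask : List Bool) (gi : Nat) : Option (List String) :=
  qOuter gi 24 [(qRep0 mask, [])] [qRep0 mask]
def allMasks : List (List Bool) :=
  [false,true].flatMap (fun b0 => [false,true].flatMap (fun b1 => [false,true].flatMap (fun b2 =>
    [false,true].flatMap (fun b3 => [false,true].flatMap (fun b4 => [false,true].map (fun b5 =>
      [b0,b1,b2,b3,b4,b5]))))))

lemma pvGetDself (d : PySem.Dict String String) (v : String) (h : v ∉ d.keys) :
    d.getD v v = v := by
  rw [PySem.Dict.getD_of_not_contains]
  simp [PySem.Dict.contains_eq_decide_mem_keys, h]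

lemma pvSig_not_letter (op v : String) (h : v ∉ pvLetters) : pvSig op v = v := by
  simp only [pvLetters, List.mem_cons, List.not_mem_nil, or_false, not_or] at h
  obtain ⟨h1, h2, h3, h4, h5, h6⟩ := h
  unfold pvSig pvCyc
  split_ifs
  · apply pvGetDself
    rw [show (PySem.Dict.ofList [("F","R"),("R","B"),("B","L"),("L","F")]).keys
        = ["F","R","B","L"] from by decide]
    simp [h1, h2, h3, h4]
  · apply pvGetDself
    rw [show (PySem.Dict.ofList [("F","L"),("L","B"),("B","R"),("R","F")]).keys
        = ["F","L","B","R"] from by decide]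
    simp [h1, h2, h3, h4]
  · apply pvGetDself
    rw [show (PySem.Dict.ofList [("U","L"),("L","D"),("D","R"),("R","U")]).keys
        = ["U","L","D","R"] from by decide]
    simp [h2, h4, h5, h6]

lemma pvValApp_append (a : List String) (op v : String) :
    pvValApp (a ++ [op]) v = pvSig op (pvValApp a v) := by
  simp [pvValApp]

lemma pvValApp_not_letter (ops : List String) (v : String) (h : v ∉ pvLetters) :
    pvValApp ops v = v := by
  induction ops with
  | nil => rfl
  | cons op t ih =>
      show pvValApp t (pvSig op v) = v
      rw [pvSig_not_letter op v h]
      exact ih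

lemma pvApply_items (op : String) (d : PySem.Dict String String) (hnd : d.keys.Nodup) :
    (pvApply op d).items = d.items.map (fun p => (p.1, pvSig op p.2)) := by
  unfold pvApply
  rw [PySem.Dict.items_foldl_insert_fresh d.keys (fun k => k)
        (fun k => (pvCyc op).getD (d.getD k "") (d.getD k "")) PySem.Dict.empty
        (fun a _ => PySem.Dict.contains_empty a) (by simpa using hnd)]
  rw [PySem.Dict.items_eq_map_keys d hnd ""]
  simp only [List.map_map]
  rw [show PySem.Dict.empty.items = ([] : List (String × String)) from rfl, List.nil_append]
  apply List.map_congr_left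
  intro k _
  rfl

lemma pvApply_keys (op : String) (d : PySem.Dict String String) (hnd : d.keys.Nodup) :
    (pvApply op d).keys = d.keys := by
  show (pvApply op d).items.map (·.1) = d.items.map (·.1)
  rw [pvApply_items op d hnd]
  simp

lemma pvDictApp_items (ops : List String) (d : PySem.Dict String String) (hnd : d.keys.Nodup) :
    (pvDictApp ops d).items = d.items.map (fun p => (p.1, pvValApp ops p.2)) ∧
    (pvDictApp ops d).keys = d.keys := by
  induction ops generalizing d with
  | nil => refine ⟨?_, rfl⟩; simp [pvDictApp, pvValApp]
  | cons op t ih =>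
      have hnd' : (pvApply op d).keys.Nodup := (pvApply_keys op d hnd) ▸ hnd
      obtain ⟨hi, hk⟩ := ih (pvApply op d) hnd'
      have hstep : pvDictApp (op :: t) d = pvDictApp t (pvApply op d) := rfl
      constructor
      · rw [hstep, hi, pvApply_items op d hnd, List.map_map]
        apply List.map_congr_left
        intro p _
        rfl
      · rw [hstep, hk, pvApply_keys op d hnd]

lemma pvDictApp_get? (ops : List String) (d : PySem.Dict String String) (hnd : d.keys.Nodup)
    (t s0 : String) (h : d.get? t = some s0) :
    (pvDictApp ops d).get? t = some (pvValApp ops s0) := by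
  have hp := PySem.Dict.mem_items_of_get?_eq_some d h
  obtain ⟨hi, hk⟩ := pvDictApp_items ops d hnd
  apply PySem.Dict.get?_of_mem_items
  · rw [hi]
    exact List.mem_map_of_mem hp
  · rw [hk]; exact hnd

lemma pvRep_step (vals : List String) (a : List String) (op : String) :
    pvRep vals (a ++ [op]) = (pvRep vals a).map (pvSig op) := by
  unfold pvRep
  rw [List.map_map]
  apply List.map_congr_left
  intro c _
  by_cases h : c ∈ vals
  · simp [h, pvValApp_append, Function.comp]
  · simp [h, Function.comp, pvSig_not_letter op "-" (by decide)]

lemma pvKeyUnique (d : PySem.Dict String String) (hnd : d.keys.Nodup)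
    (p q : String × String) (hp : p ∈ d.items) (hq : q ∈ d.items) (hk : p.1 = q.1) : p = q := by
  obtain ⟨pk, pv⟩ := p
  obtain ⟨qk, qv⟩ := q
  simp only at hk
  subst hk
  have h1 := PySem.Dict.get?_of_mem_items d hp hnd
  have h2 := PySem.Dict.get?_of_mem_items d hq hnd
  rw [h1] at h2
  simp_all

lemma pvEqCorr (d : PySem.Dict String String) (hnd : d.keys.Nodup) (a b : List String) :
    pvSortedItems (pvDictApp a d) = pvSortedItems (pvDictApp b d) ↔
    pvRep d.values a = pvRep d.values b := by
  obtain ⟨hia, _⟩ := pvDictApp_items a d hnd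
  obtain ⟨hib, _⟩ := pvDictApp_items b d hnd
  have hvals : ∀ v ∈ d.values, ∃ p ∈ d.items, p.2 = v := by
    intro v hv
    exact List.mem_map.mp hv
  constructor
  · intro h
    have pa := PySem.List.sorted2_perm (pvDictApp a d).items (·.1) (·.2) false
    have pb := PySem.List.sorted2_perm (pvDictApp b d).items (·.1) (·.2) false
    have hperm : ((pvDictApp a d).items).Perm ((pvDictApp b d).items) := by
      refine List.Perm.trans (List.Perm.symm pa) ?_
      rw [show PySem.List.sorted2 (pvDictApp a d).items (·.1) (·.2) false
            = pvSortedItems (pvDictApp a d) from rfl, h]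
      exact pb
    rw [hia, hib] at hperm
    have hv : ∀ v ∈ d.values, pvValApp a v = pvValApp b v := by
      intro v hvv
      obtain ⟨p, hp, rfl⟩ := hvals v hvv
      have hmem : (p.1, pvValApp a p.2) ∈ d.items.map (fun p => (p.1, pvValApp b p.2)) :=
        hperm.mem_iff.mp (List.mem_map_of_mem hp)
      obtain ⟨q, hq, heq⟩ := List.mem_map.mp hmem
      rw [Prod.ext_iff] at heq
      obtain ⟨hkq, hsnd⟩ := heq
      have hqp : q = p := pvKeyUnique d hnd q p hq hp hkq
      rw [hqp] at hsnd
      exact hsnd.symm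
    unfold pvRep
    apply List.map_congr_left
    intro c _
    by_cases hm : c ∈ d.values
    · simp [hm, hv c hm]
    · simp [hm]
  · intro h
    unfold pvRep at h
    have hvle := List.map_inj_left.mp h
    have hv : ∀ v ∈ d.values, pvValApp a v = pvValApp b v := by
      intro v hvv
      by_cases hLv : v ∈ pvLetters
      · have := hvle v hLv
        simpa [hvv] using this
      · rw [pvValApp_not_letter a v hLv, pvValApp_not_letter b v hLv]
    unfold pvSortedItems
    rw [hia, hib]
    have : d.items.map (fun p => (p.1, pvValApp a p.2))
         = d.items.map (fun p => (p.1, pvValApp b p.2)) := by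
      apply List.map_congr_left
      intro p hp
      have hpv : p.2 ∈ d.values := List.mem_map_of_mem hp
      rw [hv p.2 hpv]
    rw [this]

-- simulation relations
def pvRelQ (d : PySem.Dict String String)
    (qa : List (PySem.Dict String String × List String))
    (qq : List (List String × List String)) : Prop :=
  List.Forall₂ (fun ea eb => eb.2 = ea.2 ∧ ea.1 = pvDictApp ea.2 d ∧ eb.1 = pvRep d.values ea.2) qa qq
def pvRelS (d : PySem.Dict String String)
    (sa : PySem.Set (List (String × String))) (sq : List (List String)) : Prop :=
  ∀ o : List String, (pvSortedItems (pvDictApp o d) ∈ sa ↔ pvRep d.values o ∈ sq)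

lemma pvForall₂_append {α β : Type} {R : α → β → Prop} {l1 l3 : List α} {l2 l4 : List β}
    (h1 : List.Forall₂ R l1 l2) (h2 : List.Forall₂ R l3 l4) :
    List.Forall₂ R (l1 ++ l3) (l2 ++ l4) := by
  induction h1 with
  | nil => exact h2
  | cons h _ ih => exact List.Forall₂.cons h ih

lemma pvFold_sim (d : PySem.Dict String String) (hnd : d.keys.Nodup) (ops : List String)
    (l : List String)
    (sta : List (PySem.Dict String String × List String) × PySem.Set (List (String × String)))
    (stq : List (List String × List String) × List (List String))
    (hq : pvRelQ d sta.1 stq.1) (hs : pvRelS d sta.2 stq.2) :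
    pvRelQ d
      (l.foldl (fun st op =>
        let nxt := pvApply op (pvDictApp ops d)
        let key := pvSortedItems nxt
        if PySem.Set.contains st.2 key then st
        else (st.1 ++ [(nxt, ops ++ [op])], PySem.Set.add st.2 key)) sta).1
      (l.foldl (fun st op =>
        let nr := (pvRep d.values ops).map (pvSig op)
        if nr ∈ st.2 then st else (st.1 ++ [(nr, ops ++ [op])], st.2 ++ [nr])) stq).1 ∧
    pvRelS d
      (l.foldl (fun st op =>
        let nxt := pvApply op (pvDictApp ops d)
        let key := pvSortedItems nxt
        if PySem.Set.contains st.2 key then st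
        else (st.1 ++ [(nxt, ops ++ [op])], PySem.Set.add st.2 key)) sta).2
      (l.foldl (fun st op =>
        let nr := (pvRep d.values ops).map (pvSig op)
        if nr ∈ st.2 then st else (st.1 ++ [(nr, ops ++ [op])], st.2 ++ [nr])) stq).2 := by
  induction l generalizing sta stq with
  | nil => exact ⟨hq, hs⟩
  | cons op t ih =>
      simp only [List.foldl_cons]
      have hda : pvApply op (pvDictApp ops d) = pvDictApp (ops ++ [op]) d := by
        simp [pvDictApp]
      have hnr : (pvRep d.values ops).map (pvSig op) = pvRep d.values (ops ++ [op]) :=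
        (pvRep_step d.values ops op).symm
      have hkey : pvSortedItems (pvApply op (pvDictApp ops d))
          = pvSortedItems (pvDictApp (ops ++ [op]) d) := by rw [hda]
      by_cases hmem : pvRep d.values (ops ++ [op]) ∈ stq.2
      · have hmema : PySem.Set.contains sta.2 (pvSortedItems (pvApply op (pvDictApp ops d))) = true := by
          rw [PySem.Set.contains_iff, hkey]
          exact (hs (ops ++ [op])).mpr hmem
        simp only [hmema, hnr, if_true, if_pos hmem]
        exact ih sta stq hq hs
      · have hmema : PySem.Set.contains sta.2 (pvSortedItems (pvApply op (pvDictApp ops d))) = false := by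
          rw [Bool.eq_false_iff, Ne, PySem.Set.contains_iff, hkey]
          intro hc
          exact hmem ((hs (ops ++ [op])).mp hc)
        simp only [hmema, hnr, Bool.false_eq_true, if_false, if_neg hmem]
        have hq' : pvRelQ d (sta.1 ++ [(pvApply op (pvDictApp ops d), ops ++ [op])])
            (stq.1 ++ [(pvRep d.values (ops ++ [op]), ops ++ [op])]) := by
          refine pvForall₂_append hq ?_
          exact List.Forall₂.cons ⟨rfl, hda, rfl⟩ List.Forall₂.nil
        have hs' : pvRelS d (PySem.Set.add sta.2 (pvSortedItems (pvApply op (pvDictApp ops d))))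
            (stq.2 ++ [pvRep d.values (ops ++ [op])]) := by
          intro o
          rw [PySem.Set.mem_add, List.mem_append, List.mem_singleton, hkey]
          constructor
          · rintro (h1 | h2)
            · exact Or.inl ((hs o).mp h1)
            · exact Or.inr ((pvEqCorr d hnd o (ops ++ [op])).mp h2)
          · rintro (h1 | h2)
            · exact Or.inl ((hs o).mpr h1)
            · exact Or.inr ((pvEqCorr d hnd o (ops ++ [op])).mpr h2)
        exact ih _ _ hq' hs'

lemma pvInner_sim (d : PySem.Dict String String) (hnd : d.keys.Nodup)
    (target s0 : String) (hs0 : d.get? target = some s0) (gi : Nat)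
    (hrep : ∀ o : List String, (pvRep d.values o).getD gi "-" = pvValApp o s0) :
    ∀ (n : Nat) (qa : List (PySem.Dict String String × List String))
      (qq : List (List String × List String))
      (sa : PySem.Set (List (String × String))) (sq : List (List String)),
      pvRelQ d qa qq → pvRelS d sa sq →
      (∃ ops, pvInner target n qa sa = .inl ops ∧ qInner gi n qq sq = .inl ops) ∨
      (∃ qa' sa' qq' sq', pvInner target n qa sa = .inr (qa', sa') ∧
        qInner gi n qq sq = .inr (qq', sq') ∧ pvRelQ d qa' qq' ∧ pvRelS d sa' sq') := by
  intro n
  induction n with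
  | zero =>
      intro qa qq sa sq hq hs
      exact Or.inr ⟨qa, sa, qq, sq, rfl, rfl, hq, hs⟩
  | succ n ih =>
      intro qa qq sa sq hq hs
      cases hq with
      | nil => exact Or.inr ⟨[], sa, [], sq, rfl, rfl, List.Forall₂.nil, hs⟩
      | @cons a b as bs hrel hrest =>
          obtain ⟨cur, ops0⟩ := a
          obtain ⟨rep, opsq⟩ := b
          obtain ⟨h1, h2, h3⟩ := hrel
          simp only at h1 h2 h3
          subst h1
          subst h2
          subst h3
          have hget := pvDictApp_get? opsq d hnd target s0 hs0
          simp only [pvInner, qInner]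
          by_cases hD : pvValApp opsq s0 = "D"
          · rw [if_pos (by rw [hget, hD]), if_pos (by rw [hrep opsq, hD])]
            exact Or.inl ⟨opsq, rfl, rfl⟩
          · rw [if_neg (by rw [hget]; simpa using hD), if_neg (by rw [hrep opsq]; exact hD)]
            obtain ⟨hq', hs'⟩ := pvFold_sim d hnd opsq ["ROTATE_CCW", "ROTATE_CW", "TILT"]
              (as, sa) (bs, sq) hrest hs
            exact ih _ _ _ _ hq' hs'

lemma pvOuter_sim (d : PySem.Dict String String) (hnd : d.keys.Nodup)
    (target s0 : String) (hs0 : d.get? target = some s0) (gi : Nat)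
    (hrep : ∀ o : List String, (pvRep d.values o).getD gi "-" = pvValApp o s0) :
    ∀ (fuel : Nat) (qa : List (PySem.Dict String String × List String))
      (qq : List (List String × List String))
      (sa : PySem.Set (List (String × String))) (sq : List (List String)),
      pvRelQ d qa qq → pvRelS d sa sq →
      pvOuter target fuel qa sa = qOuter gi fuel qq sq := by
  intro fuel
  induction fuel with
  | zero => intro qa qq sa sq hq hs; rfl
  | succ n ih =>
      intro qa qq sa sq hq hs
      have hlen : qa.length = qq.length := List.Forall₂.length_eq hq
      simp only [pvOuter, qOuter]
      rcases pvInner_sim d hnd target s0 hs0 gi hrep qa.length qa qq sa sq hq hs with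
        ⟨ops, ha, hb⟩ | ⟨qa', sa', qq', sq', ha, hb, hq', hs'⟩
      · rw [hlen] at hb
        rw [ha, hb]
      · rw [hlen] at hb
        rw [ha, hb]
        exact ih _ _ _ _ hq' hs'

lemma pvRep0_eq (vals : List String) :
    qRep0 (pvLetters.map (fun c => decide (c ∈ vals))) = pvRep vals [] := by
  unfold qRep0 pvRep
  rw [← List.map_prod_left_eq_zip, List.map_map]
  apply List.map_congr_left
  intro c _
  by_cases h : c ∈ vals <;> simp [h, pvValApp]

lemma pvMem_allMasks (b0 b1 b2 b3 b4 b5 : Bool) : [b0, b1, b2, b3, b4, b5] ∈ allMasks := by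
  cases b0 <;> cases b1 <;> cases b2 <;> cases b3 <;> cases b4 <;> cases b5 <;> decide

set_option maxHeartbeats 4000000 in
lemma pvBigDecide : (allMasks.all (fun m => (List.range 6).all (fun gi =>
    !(m.getD gi false) || (quotRun m gi == pvOpsToD.get? (pvLetters.getD gi ""))))) = true := by
  decide

-- the target symbol is not one of the six letters: A's search never finds 'D'
def pvShaped (d : PySem.Dict String String)
    (q : List (PySem.Dict String String × List String)) : Prop :=
  ∀ e ∈ q, e.1 = pvDictApp e.2 d

lemma pvFold_shaped (d : PySem.Dict String String) (ops : List String) :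
    ∀ (l : List String)
      (sta : List (PySem.Dict String String × List String) × PySem.Set (List (String × String))),
      pvShaped d sta.1 →
      pvShaped d ((l.foldl (fun st op =>
        let nxt := pvApply op (pvDictApp ops d)
        let key := pvSortedItems nxt
        if PySem.Set.contains st.2 key then st
        else (st.1 ++ [(nxt, ops ++ [op])], PySem.Set.add st.2 key)) sta).1) := by
  intro l
  induction l with
  | nil => intro sta h; exact h
  | cons op t ih =>
      intro sta h
      simp only [List.foldl_cons]
      apply ih
      by_cases hc : PySem.Set.contains sta.2 (pvSortedItems (pvApply op (pvDictApp ops d))) = true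
      · simp only [hc, if_true]
        exact h
      · rw [Bool.not_eq_true] at hc
        simp only [hc, Bool.false_eq_true, if_false]
        intro e he
        rcases List.mem_append.mp he with h1 | h2
        · exact h e h1
        · rw [List.mem_singleton] at h2
          subst h2
          show pvApply op (pvDictApp ops d) = pvDictApp (ops ++ [op]) d
          simp [pvDictApp]

lemma pvInner_none (d : PySem.Dict String String) (hnd : d.keys.Nodup)
    (target s0 : String) (hs0 : d.get? target = some s0) (hnl : s0 ∉ pvLetters) :
    ∀ (n : Nat) (q : List (PySem.Dict String String × List String))
      (s : PySem.Set (List (String × String))), pvShaped d q →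
      ∃ q' s', pvInner target n q s = .inr (q', s') ∧ pvShaped d q' := by
  intro n
  induction n with
  | zero => intro q s h; exact ⟨q, s, rfl, h⟩
  | succ n ih =>
      intro q s h
      cases q with
      | nil => exact ⟨[], s, rfl, fun e he => absurd he List.not_mem_nil⟩
      | cons hd rest =>
          obtain ⟨cur, ops⟩ := hd
          have hcur : cur = pvDictApp ops d := h _ List.mem_cons_self
          subst hcur
          simp only [pvInner]
          rw [if_neg (by
            rw [pvDictApp_get? ops d hnd target s0 hs0]
            simp only [Option.some.injEq]
            rw [pvValApp_not_letter ops s0 hnl]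
            intro hDD
            exact hnl (by rw [hDD]; decide))]
          exact ih _ _ (pvFold_shaped d ops ["ROTATE_CCW", "ROTATE_CW", "TILT"] (rest, s)
            (fun e he => h e (List.mem_cons_of_mem _ he)))

lemma pvOuter_none (d : PySem.Dict String String) (hnd : d.keys.Nodup)
    (target s0 : String) (hs0 : d.get? target = some s0) (hnl : s0 ∉ pvLetters) :
    ∀ (fuel : Nat) (q : List (PySem.Dict String String × List String))
      (s : PySem.Set (List (String × String))), pvShaped d q →
      pvOuter target fuel q s = none := by
  intro fuel
  induction fuel with
  | zero => intro q s h; rfl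
  | succ n ih =>
      intro q s h
      simp only [pvOuter]
      obtain ⟨q', s', heq, h'⟩ := pvInner_none d hnd target s0 hs0 hnl q.length q s h
      rw [heq]
      exact ih q' s' h'

-- ===== VERDICT (by name: the statement is the Claim_ definition above) =====
theorem plan_to_bring_face_to_D_py_spec : Claim_equal_plan_to_bring_face_to_D_py := by
  unfold Claim_equal_plan_to_bring_face_to_D_py
  intro pos target _hdom hpre
  unfold Spec_plan_to_bring_face_to_D_py
  unfold Pre_plan_to_bring_face_to_D_py at hpre
  have hnd := PySem.Dict.nodup_keys_ofList pos
  rw [PySem.Dict.contains_eq_isSome_get?] at hpre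
  obtain ⟨s0, hs0⟩ := Option.isSome_iff_exists.mp hpre
  have hB : plan_to_bring_face_to_D_py_alt pos target = pvOpsToD.get? s0 := by
    unfold plan_to_bring_face_to_D_py_alt
    rw [hs0]
  have hA : plan_to_bring_face_to_D_py pos target
      = pvOuter target 24 [(PySem.Dict.ofList pos, [])]
          (PySem.Set.add PySem.Set.empty (pvSortedItems (PySem.Dict.ofList pos))) := rfl
  rw [hA, hB]
  by_cases hL : s0 ∈ pvLetters
  · obtain ⟨gi, hlt, hget⟩ := List.getElem_of_mem hL
    have hs0v : s0 ∈ (PySem.Dict.ofList pos).values := by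
      have hp := PySem.Dict.mem_items_of_get?_eq_some _ hs0
      exact List.mem_map_of_mem hp
    have hrep : ∀ o, (pvRep (PySem.Dict.ofList pos).values o).getD gi "-" = pvValApp o s0 := by
      intro o
      unfold pvRep
      rw [List.getD_eq_getElem?_getD, List.getElem?_map, List.getElem?_eq_getElem hlt, hget]
      simp [hs0v]
    have hrq : pvRelQ (PySem.Dict.ofList pos) [(PySem.Dict.ofList pos, [])]
        [(pvRep (PySem.Dict.ofList pos).values [], [])] :=
      List.Forall₂.cons ⟨rfl, rfl, rfl⟩ List.Forall₂.nil
    have hrs : pvRelS (PySem.Dict.ofList pos)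
        (PySem.Set.add PySem.Set.empty (pvSortedItems (PySem.Dict.ofList pos)))
        [pvRep (PySem.Dict.ofList pos).values []] := by
      intro o
      rw [PySem.Set.mem_add, List.mem_singleton]
      have hc := pvEqCorr (PySem.Dict.ofList pos) hnd o []
      constructor
      · rintro (h1 | h2)
        · cases h1
        · exact hc.mp h2
      · intro h1
        exact Or.inr (hc.mpr h1)
    have hsim := pvOuter_sim (PySem.Dict.ofList pos) hnd target s0 hs0 gi hrep 24 _ _ _ _ hrq hrs
    rw [hsim]
    have hquot : quotRun (pvLetters.map (fun c => decide (c ∈ (PySem.Dict.ofList pos).values))) gi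
        = qOuter gi 24 [(pvRep (PySem.Dict.ofList pos).values [], [])]
            [pvRep (PySem.Dict.ofList pos).values []] := by
      unfold quotRun
      rw [pvRep0_eq]
    rw [← hquot]
    have hall := pvBigDecide
    rw [List.all_eq_true] at hall
    have hmaskmem : (pvLetters.map (fun c => decide (c ∈ (PySem.Dict.ofList pos).values)))
        ∈ allMasks := by
      simp only [pvLetters, List.map_cons, List.map_nil]
      exact pvMem_allMasks _ _ _ _ _ _
    have h1 := hall _ hmaskmem
    rw [List.all_eq_true] at h1
    have hgi6 : gi ∈ List.range 6 := by
      rw [List.mem_range]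
      simpa [pvLetters] using hlt
    have h2 := h1 gi hgi6
    have hmaskgi : (pvLetters.map (fun c => decide (c ∈ (PySem.Dict.ofList pos).values))).getD gi false
        = true := by
      rw [List.getD_eq_getElem?_getD, List.getElem?_map, List.getElem?_eq_getElem hlt, hget]
      simpa using hs0v
    rw [hmaskgi] at h2
    simp only [Bool.not_true, Bool.false_or, beq_iff_eq] at h2
    rw [h2]
    congr 1
    rw [List.getD_eq_getElem?_getD, List.getElem?_eq_getElem hlt, hget]
    rfl
  · rw [pvOuter_none (PySem.Dict.ofList pos) hnd target s0 hs0 hL 24 _ _ (fun e he => by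
      rw [List.mem_singleton] at he
      subst he
      rfl)]
    symm
    rw [PySem.Dict.get?_eq_none_iff_not_mem_keys]
    rw [show pvOpsToD.keys = ["D", "L", "U", "F", "B", "R"] from by decide]
    simp only [pvLetters, List.mem_cons, List.not_mem_nil, or_false, not_or] at hL ⊢
    tauto
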